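-- pv_equiv track=rewrite | github.com/DevNoteKeeper/Advent-of-Code-2025 | day_6.py | parse_numbers_and_signs
-- ===== SOURCE A (Python) =====
-- def get_problem_column(lines):
--     width = max(len(line) for line in lines)
--     def is_empty_col(c):
--         return all(c >= len(line) or line[c] == ' ' for line in lines)
--
--     problems = []
--     start = None
--     for c in range(width):
--         if not is_empty_col(c):
--             if start is None:
--                 start = c
--         else:
--             if start is not None:
--                 problems.append((start, c))
--                 start = None
--     if start is not None:
--         problems.append((start, width))
--     return problems
--
-- def parse_numbers_and_signs(lines):
--     problems_col = get_problem_column(lines)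
--
--     numbers = []
--     signs = []
--
--     for l, r in problems_col:
--         nums=[]
--         for line in lines[:-1]:
--             s=line[l:r].strip()
--             if s:
--                 nums.append(int(s))
--
--         numbers.append(tuple(nums))
--
--         sign = lines[-1][l:r].strip()
--         signs.append(sign)
--     return numbers, signs
-- ===== SOURCE B (Python) =====
-- def parse_numbers_and_signs(lines):
--     # set of all column indices that contain a non-space character in some line
--     filled = {c for line in lines for c, ch in enumerate(line) if ch != ' '}
--     # a run starts at c when c is filled and c-1 is not; it ends at c+1 when c+1 is not filled
--     starts = sorted(c for c in filled if c - 1 not in filled)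
--     ends = sorted(c + 1 for c in filled if c + 1 not in filled)
--     body, last = lines[:-1], lines[-1]
--     numbers = [tuple(int(s) for s in (line[l:r].strip() for line in body) if s)
--                for l, r in zip(starts, ends)]
--     signs = [last[l:r].strip() for l, r in zip(starts, ends)]
--     return numbers, signs
-- ===== Notes on version B (the rewrite author's own statement) =====
-- stated objective: simpler
-- what changed: Replaces the width-scan with stateful run-tracking (per-column all() probes plus a start/None state machine) by building the set of filled column indices once and reading each run's start/end off as the boundary columns (c filled, c-1/c+1 not), pairing them with zip; extraction becomes two comprehensions over the spans.
import Mathlib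
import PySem

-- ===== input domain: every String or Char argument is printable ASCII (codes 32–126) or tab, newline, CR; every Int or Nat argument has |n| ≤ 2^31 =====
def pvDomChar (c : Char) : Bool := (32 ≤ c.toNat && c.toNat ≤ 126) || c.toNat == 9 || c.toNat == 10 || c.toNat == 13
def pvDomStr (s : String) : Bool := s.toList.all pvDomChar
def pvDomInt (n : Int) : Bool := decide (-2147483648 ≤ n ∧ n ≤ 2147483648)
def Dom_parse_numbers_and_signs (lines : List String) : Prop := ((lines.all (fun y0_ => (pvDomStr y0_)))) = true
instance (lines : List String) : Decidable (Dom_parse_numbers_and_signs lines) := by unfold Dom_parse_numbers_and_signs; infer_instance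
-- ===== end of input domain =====

-- B replaces A's stateful per-column run scan by a set of filled columns whose boundary
-- elements, sorted, are the run starts/ends; objective: simpler.

-- ===== PORT A =====
def pvWidthA (lines : List String) : Int :=
  (PySem.List.max? (lines.map (fun line => (line.toList.length : Int))) (fun x => x)).getD 0

def pvIsEmptyColA (lines : List String) (c : Int) : Bool :=
  lines.all (fun line =>
    decide ((line.toList.length : Int) ≤ c) || ((PySem.List.pyGet? line.toList c).getD ' ' == ' '))

def pvScanA (lines : List String) (width : Int) : List (Int × Int) × Option Int :=
  (PySem.List.pyRange 0 width 1).foldl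
    (fun st c =>
      if !(pvIsEmptyColA lines c) then
        match st.2 with
        | none => (st.1, some c)
        | some _ => st
      else
        match st.2 with
        | some s => (st.1 ++ [(s, c)], none)
        | none => st)
    ([], none)

def pvProblemsA (lines : List String) : List (Int × Int) :=
  let width := pvWidthA lines
  let st := pvScanA lines width
  match st.2 with
  | some s => st.1 ++ [(s, width)]
  | none => st.1

def parse_numbers_and_signs (lines : List String) : List (List Int) × List String :=
  (pvProblemsA lines).foldl
    (fun acc lr =>
      let nums := (PySem.List.slice lines none (some (-1))).foldl
        (fun ns line =>
          let s := PySem.Chars.strip (PySem.List.slice line.toList (some lr.1) (some lr.2))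
          if s ≠ [] then ns ++ [(PySem.Int.ofChars? s).getD 0] else ns) []
      let sign := PySem.Chars.strip
        (PySem.List.slice ((PySem.List.pyGet? lines (-1)).getD "").toList (some lr.1) (some lr.2))
      (acc.1 ++ [nums], acc.2 ++ [String.ofList sign]))
    ([], [])

-- ===== PORT B =====
def pvFilledB (lines : List String) : PySem.Set Int :=
  PySem.Set.ofList (lines.flatMap (fun line =>
    (PySem.List.enumerate line.toList 0).filterMap (fun p => if p.2 != ' ' then some p.1 else none)))

def pvStartsB (lines : List String) : List Int :=
  PySem.List.sorted ((pvFilledB lines).filter (fun c => !((pvFilledB lines).contains (c - 1))))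
    (fun x => x) false

def pvEndsB (lines : List String) : List Int :=
  PySem.List.sorted
    (((pvFilledB lines).filter (fun c => !((pvFilledB lines).contains (c + 1)))).map (fun c => c + 1))
    (fun x => x) false

def parse_numbers_and_signs_alt (lines : List String) : List (List Int) × List String :=
  let spans := (pvStartsB lines).zip (pvEndsB lines)
  let body := PySem.List.slice lines none (some (-1))
  let last := (PySem.List.pyGet? lines (-1)).getD ""
  (spans.map (fun lr =>
      body.filterMap (fun line =>
        let s := PySem.Chars.strip (PySem.List.slice line.toList (some lr.1) (some lr.2))
        if s ≠ [] then some ((PySem.Int.ofChars? s).getD 0) else none)),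
   spans.map (fun lr =>
      String.ofList (PySem.Chars.strip (PySem.List.slice last.toList (some lr.1) (some lr.2)))))

-- ===== PRECONDITION & SPEC =====
-- Column k (Nat) holds a non-space character in some line.
def pvQN (lines : List String) (k : Nat) : Bool :=
  lines.any (fun line => decide (k < line.toList.length) && (line.toList.getD k ' ' != ' '))

-- Pre_ = exactly the inputs on which the Python A returns: lines nonempty (else max() raises
-- ValueError) and, on every maximal filled-column run [l,r), each non-last line's slice strips
-- to "" or to a valid int literal (else int() raises ValueError).
def pvPreOK (lines : List String) : Bool :=
  let n := (lines.map (fun line => line.toList.length)).foldl max 0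
  (List.range n).all (fun l =>
    (List.range (n + 1)).all (fun r =>
      !(decide (l < r) &&
        (List.range r).all (fun c => decide (c < l) || pvQN lines c) &&
        (decide (l = 0) || !pvQN lines (l - 1)) &&
        (decide (r = n) || !pvQN lines r)) ||
      lines.dropLast.all (fun line =>
        (PySem.Chars.strip ((line.toList.drop l).take (r - l))).isEmpty ||
        (PySem.Int.ofChars? (PySem.Chars.strip ((line.toList.drop l).take (r - l)))).isSome)))

def Pre_parse_numbers_and_signs (lines : List String) : Prop :=
  lines ≠ [] ∧ pvPreOK lines = true
instance (lines : List String) : Decidable (Pre_parse_numbers_and_signs lines) := by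
  unfold Pre_parse_numbers_and_signs; infer_instance
def pvWitness_parse_numbers_and_signs : List String := ["1 23", "4  5", "+  *"]

def Spec_parse_numbers_and_signs (lines : List String) (out : List (List Int) × List String) : Prop := out = parse_numbers_and_signs_alt lines
instance (lines : List String) (out : List (List Int) × List String) : Decidable (Spec_parse_numbers_and_signs lines out) := by unfold Spec_parse_numbers_and_signs; infer_instance

-- ===== CLAIM (what is proved, stated in full; the proofs are below) =====
def Claim_equal_parse_numbers_and_signs : Prop := ∀ (lines : List String), Dom_parse_numbers_and_signs lines → Pre_parse_numbers_and_signs lines → Spec_parse_numbers_and_signs lines (parse_numbers_and_signs lines)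

-- ===== LEMMAS AND PROOFS =====

-- Column predicate on Int indices (false for negative c), shared characterisation of both ports.
def pvQi (lines : List String) (c : Int) : Bool :=
  decide (0 ≤ c) &&
    lines.any (fun line => decide (c < (line.toList.length : Int)) && (line.toList.getD c.toNat ' ' != ' '))

-- run starts / run ends detected among columns [0, m)
def pvS (lines : List String) (m : Int) : List Int :=
  (PySem.List.pyRange 0 m 1).filter (fun c => pvQi lines c && !pvQi lines (c - 1))
def pvE (lines : List String) (m : Int) : List Int :=
  (PySem.List.pyRange 0 m 1).filter (fun e => pvQi lines (e - 1) && !pvQi lines e)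

lemma pvQi_bounds (lines : List String) (c : Int) (h : pvQi lines c = true) :
    0 ≤ c ∧ c < pvWidthA lines := by
  unfold pvQi at h
  simp only [Bool.and_eq_true, decide_eq_true_eq, List.any_eq_true] at h
  obtain ⟨h0, line, hline, hlt, _⟩ := h
  refine ⟨h0, ?_⟩
  unfold pvWidthA
  cases hm : PySem.List.max? (lines.map fun line => (line.toList.length : Int)) (fun x => x) with
  | none =>
    have : lines = [] := by simpa using (PySem.List.max?_eq_none_iff _ _).mp hm
    subst this; simp at hline
  | some m =>
    have hmax := PySem.List.max?_isMax hm ((line.toList.length : Int))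
      (List.mem_map_of_mem hline)
    simp only [Option.getD_some]
    omega

lemma pvQi_width (lines : List String) : pvQi lines (pvWidthA lines) = false := by
  by_cases h : pvQi lines (pvWidthA lines) = true
  · exact absurd (pvQi_bounds lines _ h).2 (lt_irrefl _)
  · simpa using h

lemma pvQi_neg_one (lines : List String) : pvQi lines (-1) = false := by
  simp [pvQi]

lemma pvIsEmptyColA_eq (lines : List String) (c : Int) (hc : 0 ≤ c) :
    (!(pvIsEmptyColA lines c)) = pvQi lines c := by
  unfold pvIsEmptyColA pvQi
  simp only [hc, decide_true, Bool.true_and]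
  induction lines with
  | nil => simp
  | cons line rest ih =>
    simp only [List.all_cons, List.any_cons, Bool.not_and, ← ih]
    congr 1
    by_cases hlt : c < (line.toList.length : Int)
    · have hk : c = ((c.toNat : Nat) : Int) := (Int.toNat_of_nonneg hc).symm
      have hklen : c.toNat < line.toList.length := by omega
      have d1 : decide ((line.toList.length : Int) ≤ c) = false := by
        simp only [decide_eq_false_iff_not]; omega
      have d2 : decide (c < (line.toList.length : Int)) = true := by
        simp only [decide_eq_true_eq]; omega
      rw [d1, d2, hk, PySem.List.pyGet?_natCast, List.getD_eq_getElem?_getD]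
      simp [bne, show max c 0 = c from by omega]
    · have d1 : decide ((line.toList.length : Int) ≤ c) = true := by
        simp only [decide_eq_true_eq]; omega
      have d2 : decide (c < (line.toList.length : Int)) = false := by
        simp only [decide_eq_false_iff_not]; omega
      rw [d1, d2]
      simp

lemma mem_pvFilledB (lines : List String) (c : Int) :
    c ∈ pvFilledB lines ↔ pvQi lines c = true := by
  unfold pvFilledB pvQi
  rw [PySem.Set.mem_ofList]
  simp only [List.mem_flatMap, List.mem_filterMap, PySem.List.mem_enumerate_iff,
    Bool.and_eq_true, decide_eq_true_eq, List.any_eq_true]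
  constructor
  · rintro ⟨line, hline, p, ⟨k, hk, rfl⟩, hp⟩
    simp only [zero_add] at hp
    by_cases hch : line.toList[k] != ' '
    · simp only [hch] at hp
      rw [if_pos (by simpa using hch)] at hp
      obtain rfl := Option.some.inj hp
      refine ⟨by positivity, line, hline, by exact_mod_cast hk, ?_⟩
      simp only [Int.toNat_natCast]
      rw [List.getD_eq_getElem?_getD, List.getElem?_eq_getElem hk]
      simpa using hch
    · rw [if_neg (by simpa using hch)] at hp
      exact absurd hp (by simp)
  · rintro ⟨h0, line, hline, hlt, hne⟩
    refine ⟨line, hline, ((c.toNat : Int), line.toList[c.toNat]'(by omega)), ⟨c.toNat, by omega, by simp⟩, ?_⟩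
    have hklen : c.toNat < line.toList.length := by omega
    rw [List.getD_eq_getElem?_getD, List.getElem?_eq_getElem hklen] at hne
    simp only [Option.getD_some] at hne
    rw [if_pos (by simpa using hne)]
    simp [Int.toNat_of_nonneg h0]

lemma nodup_pvFilledB (lines : List String) : (pvFilledB lines).Nodup := by
  exact PySem.Set.nodup_ofList _

lemma pvContains_eq (lines : List String) (x : Int) :
    ((pvFilledB lines).contains x) = pvQi lines x := by
  rw [Bool.eq_iff_iff]
  constructor
  · intro hx; exact (mem_pvFilledB lines x).mp (List.mem_of_elem_eq_true hx)
  · intro hx; exact List.elem_eq_true_of_mem ((mem_pvFilledB lines x).mpr hx)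

lemma pvStartsB_eq (lines : List String) : pvStartsB lines = pvS lines (pvWidthA lines) := by
  unfold pvStartsB pvS
  apply PySem.List.sorted_eq_of_perm_of_pairwise_lt
  · rw [List.perm_ext_iff_of_nodup
      (List.Nodup.filter _ (PySem.List.nodup_pyRange_one 0 (pvWidthA lines)))
      (List.Nodup.filter _ (nodup_pvFilledB lines))]
    intro c
    simp only [List.mem_filter, PySem.List.mem_pyRange_one, mem_pvFilledB, pvContains_eq,
      Bool.and_eq_true, Bool.not_eq_eq_eq_not, Bool.not_true]
    constructor
    · rintro ⟨_, hq, hq1⟩; exact ⟨hq, by simpa using hq1⟩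
    · rintro ⟨hq, hq1⟩
      exact ⟨by exact ⟨(pvQi_bounds lines c hq).1, (pvQi_bounds lines c hq).2⟩, hq, by simpa using hq1⟩
  · exact List.Pairwise.filter _ (PySem.List.pairwise_lt_pyRange_one 0 (pvWidthA lines))

lemma pvEndsB_eq (lines : List String) :
    pvEndsB lines =
      (PySem.List.pyRange 1 (pvWidthA lines + 1) 1).filter
        (fun e => pvQi lines (e - 1) && !pvQi lines e) := by
  unfold pvEndsB
  apply PySem.List.sorted_eq_of_perm_of_pairwise_lt
  · rw [List.perm_ext_iff_of_nodup
      (List.Nodup.filter _ (PySem.List.nodup_pyRange_one 1 (pvWidthA lines + 1)))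
      (List.Nodup.map (fun a b h => by omega) (List.Nodup.filter _ (nodup_pvFilledB lines)))]
    intro e
    simp only [List.mem_filter, PySem.List.mem_pyRange_one, List.mem_map, mem_pvFilledB,
      pvContains_eq, Bool.and_eq_true, Bool.not_eq_eq_eq_not, Bool.not_true]
    constructor
    · rintro ⟨_, hq, hq1⟩
      exact ⟨e - 1, ⟨hq, by simpa using hq1⟩, by ring⟩
    · rintro ⟨c, ⟨hq, hq1⟩, rfl⟩
      have hb := pvQi_bounds lines c hq
      refine ⟨⟨by omega, by omega⟩, by simpa using hq, by simpa using hq1⟩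
  · exact List.Pairwise.filter _ (PySem.List.pairwise_lt_pyRange_one 1 (pvWidthA lines + 1))

lemma pvEndsB_split (lines : List String) (h0 : 0 ≤ pvWidthA lines) :
    pvEndsB lines =
      pvE lines (pvWidthA lines) ++
        (if pvQi lines (pvWidthA lines - 1) = true then [pvWidthA lines] else []) := by
  rw [pvEndsB_eq]
  unfold pvE
  have h1 : PySem.List.pyRange 0 (pvWidthA lines + 1) 1 =
      0 :: PySem.List.pyRange 1 (pvWidthA lines + 1) 1 :=
    PySem.List.pyRange_one_cons (by omega)
  have h2 : (PySem.List.pyRange 1 (pvWidthA lines + 1) 1).filter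
      (fun e => pvQi lines (e - 1) && !pvQi lines e) =
      (PySem.List.pyRange 0 (pvWidthA lines + 1) 1).filter
      (fun e => pvQi lines (e - 1) && !pvQi lines e) := by
    rw [h1, List.filter_cons]
    simp [pvQi_neg_one]
  rw [h2, PySem.List.pyRange_one_succ_right h0, List.filter_append, List.filter_singleton]
  congr 1
  by_cases hq : pvQi lines (pvWidthA lines - 1) = true
  · simp [hq, pvQi_width]
  · simp only [Bool.not_eq_true] at hq
    simp [hq]

lemma pv_zip_snoc_left {α β : Type} (xs : List α) (ys : List β) (a : α)
    (h : ys.length ≤ xs.length) : (xs ++ [a]).zip ys = xs.zip ys := by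
  induction xs generalizing ys with
  | nil => cases ys <;> simp_all
  | cons x xs ih => cases ys <;> simp_all

lemma pv_zip_snoc_right {α β : Type} (xs : List α) (ys : List β) (s : α) (b : β)
    (h : xs.length = ys.length + 1) (hs : xs.getLast? = some s) :
    xs.zip (ys ++ [b]) = xs.zip ys ++ [(s, b)] := by
  induction xs generalizing ys with
  | nil => simp at h
  | cons x xs ih =>
    cases ys with
    | nil =>
      have : xs = [] := by simpa using h
      subst this
      simp_all
    | cons y ys =>
      cases xs with
      | nil => simp at h
      | cons x2 xs2 =>
        have hs' : (x2 :: xs2).getLast? = some s := by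
          rwa [List.getLast?_cons_cons] at hs
        simp only [List.cons_append, List.zip_cons_cons]
        rw [ih ys (by simpa using h) hs']

lemma pvScan_inv (lines : List String) (m : Nat) :
    pvScanA lines (m : Int) =
      ((pvS lines m).zip (pvE lines m),
        if pvQi lines ((m : Int) - 1) = true then (pvS lines m).getLast? else none) ∧
      (pvS lines m).length =
        (pvE lines m).length + (if pvQi lines ((m : Int) - 1) = true then 1 else 0) := by
  induction m with
  | zero =>
    have hnil : PySem.List.pyRange 0 ((0 : Nat) : Int) 1 = [] :=
      PySem.List.pyRange_one_eq_nil (by omega)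
    have hq : pvQi lines (((0 : Nat) : Int) - 1) = false := by
      simpa using pvQi_neg_one lines
    unfold pvScanA pvS pvE
    rw [hnil, hq]
    simp
  | succ m ih =>
    obtain ⟨ihst, ihlen⟩ := ih
    have hm0 : (0 : Int) ≤ (m : Int) := by positivity
    have hcast : ((m + 1 : Nat) : Int) = (m : Int) + 1 := by push_cast; ring
    have hsplit : PySem.List.pyRange 0 ((m : Int) + 1) 1 =
        PySem.List.pyRange 0 (m : Int) 1 ++ [(m : Int)] :=
      PySem.List.pyRange_one_succ_right hm0
    have hQe : (!(pvIsEmptyColA lines (m : Int))) = pvQi lines (m : Int) :=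
      pvIsEmptyColA_eq lines _ hm0
    have hS : pvS lines ((m : Int) + 1) =
        pvS lines m ++ (if pvQi lines (m : Int) && !pvQi lines ((m : Int) - 1)
          then [(m : Int)] else []) := by
      unfold pvS
      rw [hsplit, List.filter_append, List.filter_singleton]
      cases h : (pvQi lines (m : Int) && !pvQi lines ((m : Int) - 1)) <;> simp
    have hE : pvE lines ((m : Int) + 1) =
        pvE lines m ++ (if pvQi lines ((m : Int) - 1) && !pvQi lines (m : Int)
          then [(m : Int)] else []) := by
      unfold pvE
      rw [hsplit, List.filter_append, List.filter_singleton]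
      cases h : (pvQi lines ((m : Int) - 1) && !pvQi lines (m : Int)) <;> simp
    have hpend : ((m : Int) + 1) - 1 = (m : Int) := by ring
    unfold pvScanA at ihst ⊢
    rw [hcast, hsplit, List.foldl_append, ihst, hS, hE, hpend]
    simp only [List.foldl_cons, List.foldl_nil, hQe]
    cases hQm : pvQi lines (m : Int) with
    | false =>
      cases hQm1 : pvQi lines ((m : Int) - 1) with
      | false =>
        rw [hQm1] at ihlen
        simp [ihlen]
      | true =>
        rw [hQm1] at ihlen
        simp only [if_true] at ihlen
        have hne : pvS lines m ≠ [] := by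
          intro hnil; rw [hnil] at ihlen; simp at ihlen
        obtain ⟨s, hs⟩ := Option.isSome_iff_exists.mp (List.getLast?_isSome.mpr hne)
        have hz := pv_zip_snoc_right (pvS lines m) (pvE lines m) s (m : Int) ihlen hs
        simp [hs, hz, ihlen]
    | true =>
      cases hQm1 : pvQi lines ((m : Int) - 1) with
      | false =>
        rw [hQm1] at ihlen
        simp only [if_false, Bool.false_eq_true] at ihlen
        have hz := pv_zip_snoc_left (pvS lines m) (pvE lines m) (m : Int) (by omega)
        simp [hz, ihlen]
      | true =>
        rw [hQm1] at ihlen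
        simp only [if_true] at ihlen
        have hne : pvS lines m ≠ [] := by
          intro hnil; rw [hnil] at ihlen; simp at ihlen
        obtain ⟨s, hs⟩ := Option.isSome_iff_exists.mp (List.getLast?_isSome.mpr hne)
        simp [hs, ihlen]


lemma pvWidthA_nonneg (lines : List String) (h : lines ≠ []) : 0 ≤ pvWidthA lines := by
  unfold pvWidthA
  cases hm : PySem.List.max? (lines.map fun line => (line.toList.length : Int)) (fun x => x) with
  | none =>
    have : lines = [] := by simpa using (PySem.List.max?_eq_none_iff _ _).mp hm
    exact absurd this h
  | some m =>
    have hmem := PySem.List.max?_mem hm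
    simp only [List.mem_map] at hmem
    obtain ⟨line, _, rfl⟩ := hmem
    simp

lemma pvProblemsA_eq (lines : List String) (h : lines ≠ []) :
    pvProblemsA lines = (pvStartsB lines).zip (pvEndsB lines) := by
  have hw : 0 ≤ pvWidthA lines := pvWidthA_nonneg lines h
  obtain ⟨hst, hlen⟩ := pvScan_inv lines (pvWidthA lines).toNat
  rw [Int.toNat_of_nonneg hw] at hst hlen
  unfold pvProblemsA
  rw [pvStartsB_eq, pvEndsB_split lines hw]
  by_cases hq : pvQi lines (pvWidthA lines - 1) = true
  · simp only [hq, if_true] at hst hlen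
    have hne : pvS lines (pvWidthA lines) ≠ [] := by
      intro hnil; rw [hnil] at hlen; simp at hlen
    obtain ⟨s, hs⟩ := Option.isSome_iff_exists.mp (List.getLast?_isSome.mpr hne)
    have hz := pv_zip_snoc_right (pvS lines (pvWidthA lines)) (pvE lines (pvWidthA lines))
      s (pvWidthA lines) hlen hs
    simp [hst, hs, hz, hq]
  · simp only [hq] at hst hlen
    simp [hst, hq]

lemma pv_foldl_pair {γ δ : Type} (spans : List (Int × Int)) (f : Int × Int → γ) (g : Int × Int → δ)
    (a1 : List γ) (a2 : List δ) :
    spans.foldl (fun acc lr => (acc.1 ++ [f lr], acc.2 ++ [g lr])) (a1, a2) =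
      (a1 ++ spans.map f, a2 ++ spans.map g) := by
  induction spans generalizing a1 a2 with
  | nil => simp
  | cons lr spans ih => simp [ih]

lemma pv_foldl_if_filterMap {α β : Type} (xs : List α) (p : α → Prop) [DecidablePred p]
    (f : α → β) (init : List β) :
    xs.foldl (fun ns x => if p x then ns ++ [f x] else ns) init =
      init ++ xs.filterMap (fun x => if p x then some (f x) else none) := by
  induction xs generalizing init with
  | nil => simp
  | cons x xs ih =>
    by_cases hp : p x <;> simp [hp, ih]

-- ===== VERDICT (by name: the statement is the Claim_ definition above) =====
theorem parse_numbers_and_signs_spec : Claim_equal_parse_numbers_and_signs := by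
  intro lines _ hpre
  unfold Spec_parse_numbers_and_signs parse_numbers_and_signs parse_numbers_and_signs_alt
  rw [pvProblemsA_eq lines hpre.1, pv_foldl_pair]
  simp only [List.nil_append, Prod.mk.injEq]
  refine ⟨?_, trivial⟩
  apply List.map_congr_left
  intro lr _
  simpa using pv_foldl_if_filterMap (PySem.List.slice lines none (some (-1)))
    (fun line => PySem.Chars.strip (PySem.List.slice line.toList (some lr.1) (some lr.2)) ≠ [])
    (fun line => (PySem.Int.ofChars? (PySem.Chars.strip
      (PySem.List.slice line.toList (some lr.1) (some lr.2)))).getD 0) []
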